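-- pv_equiv track=rewrite | github.com/Zxy876/drift-system | backend/app/api/registry_api.py | _group_player_tags
-- ===== SOURCE A (Python) =====
-- from typing import Any, Dict, List
--
-- def _group_player_tags(items: List[Dict[str, Any]]) -> Dict[str, List[str]]:
--     grouped: Dict[str, List[str]] = {}
--     seen: Dict[str, set[str]] = {}
--
--     for item in items:
--         tag = str(item.get("tag") or "").strip()
--         resource_id = str(item.get("resource_id") or "").strip()
--         if not tag or not resource_id:
--             continue
--
--         if tag not in grouped:
--             grouped[tag] = []
--             seen[tag] = set()
--
--         if resource_id in seen[tag]:
--             continue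
--
--         seen[tag].add(resource_id)
--         grouped[tag].append(resource_id)
--
--     return grouped
-- ===== SOURCE B (Python) =====
-- from typing import Any, Dict, List
--
-- def _group_player_tags(items: List[Dict[str, Any]]) -> Dict[str, List[str]]:
--     # flatten to the valid (tag, resource_id) pairs first
--     pairs = []
--     for item in items:
--         tag = str(item.get("tag") or "").strip()
--         resource_id = str(item.get("resource_id") or "").strip()
--         if tag and resource_id:
--             pairs.append((tag, resource_id))
--     # one nested scan of pairs per distinct tag, tags in first-occurrence order
--     return {tag: list(dict.fromkeys(r for t, r in pairs if t == tag))
--             for tag in dict.fromkeys(t for t, _ in pairs)}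
-- ===== Notes on version B (the rewrite author's own statement) =====
-- stated objective: alternative
-- what changed: Instead of one pass that maintains parallel grouped/seen dicts, B flattens the input to valid (tag, resource_id) pairs and then, for each distinct tag in first-occurrence order, rescans the pair list to collect and dedup that tag's resource_ids.
import Mathlib
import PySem

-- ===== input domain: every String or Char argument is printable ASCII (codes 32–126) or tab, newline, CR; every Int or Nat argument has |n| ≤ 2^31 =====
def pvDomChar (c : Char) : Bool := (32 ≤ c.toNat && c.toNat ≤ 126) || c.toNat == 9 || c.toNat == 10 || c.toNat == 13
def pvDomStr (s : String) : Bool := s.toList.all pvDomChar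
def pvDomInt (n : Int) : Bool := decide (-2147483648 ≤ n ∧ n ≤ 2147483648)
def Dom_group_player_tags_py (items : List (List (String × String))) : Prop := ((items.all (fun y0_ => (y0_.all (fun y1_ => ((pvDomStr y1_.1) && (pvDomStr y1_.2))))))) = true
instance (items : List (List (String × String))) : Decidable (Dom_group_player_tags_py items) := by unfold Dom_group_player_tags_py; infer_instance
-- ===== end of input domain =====

-- B replaces A's single pass with parallel grouped/seen dicts by a flatten-to-pairs pass
-- followed by one rescan of the pair list per distinct tag; same values, objective: alternative.

-- shared field extraction: str(item.get(key) or "").strip()  (assoc-list lookup = first match)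
def pvField (item : List (String × String)) (key : String) : String :=
  PySem.Str.strip (((item.find? (fun p => p.1 == key)).map Prod.snd).getD "")

-- ===== PORT A =====
def groupStepA (st : PySem.Dict String (List String) × PySem.Dict String (PySem.Set String))
    (item : List (String × String)) :
    PySem.Dict String (List String) × PySem.Dict String (PySem.Set String) :=
  let tag := pvField item "tag"
  let rid := pvField item "resource_id"
  if tag = "" ∨ rid = "" then st
  else
    let gs := if st.1.contains tag then st else (st.1.insert tag [], st.2.insert tag [])
    if (gs.2.getD tag []).contains rid then gs
    else (gs.1.modify tag [] (fun l => l ++ [rid]), gs.2.modify tag [] (fun s => s.add rid))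

def group_player_tags_py (items : List (List (String × String))) : List (String × List String) :=
  (items.foldl groupStepA (PySem.Dict.empty, PySem.Dict.empty)).1.items

-- ===== PORT B =====
-- the flattening loop of Source B: the valid (tag, resource_id) pairs in order
def pvPairs (items : List (List (String × String))) : List (String × String) :=
  items.filterMap (fun item =>
    let tag := pvField item "tag"
    let rid := pvField item "resource_id"
    if tag = "" ∨ rid = "" then none else some (tag, rid))

def group_player_tags_py_alt (items : List (List (String × String))) : List (String × List String) :=
  let pairs := pvPairs items
  (PySem.List.dedup (pairs.map Prod.fst)).map
    (fun tag => (tag, PySem.List.dedup ((pairs.filter (fun p => p.1 == tag)).map Prod.snd)))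

-- ===== PRECONDITION & SPEC =====
def Spec_group_player_tags_py (items : List (List (String × String))) (out : List (String × List String)) : Prop := out = group_player_tags_py_alt items
instance (items : List (List (String × String))) (out : List (String × List String)) : Decidable (Spec_group_player_tags_py items out) := by unfold Spec_group_player_tags_py; infer_instance

-- ===== CLAIM (what is proved, stated in full; the proofs are below) =====
def Claim_equal_group_player_tags_py : Prop := ∀ (items : List (List (String × String))), Dom_group_player_tags_py items → Spec_group_player_tags_py items (group_player_tags_py items)

-- ===== LEMMAS AND PROOFS =====

-- B's result as a function of an arbitrary processed pair list
def gSpec (done : List (String × String)) : List (String × List String) :=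
  (PySem.List.dedup (done.map Prod.fst)).map
    (fun tag => (tag, PySem.List.dedup ((done.filter (fun p => p.1 == tag)).map Prod.snd)))

lemma pv_add_mem {x : String} (s : PySem.Set String) (h : x ∈ s) : PySem.Set.add s x = s := by
  simp [PySem.Set.add, PySem.Set.contains, h]

lemma pv_add_not_mem {x : String} (s : PySem.Set String) (h : x ∉ s) : PySem.Set.add s x = s ++ [x] := by
  simp [PySem.Set.add, PySem.Set.contains, h]

lemma pv_dedup_concat (v : List String) (x : String) :
    PySem.List.dedup (v ++ [x]) = if x ∈ v then PySem.List.dedup v else PySem.List.dedup v ++ [x] := by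
  rw [PySem.List.dedup_eq_ofList, PySem.List.dedup_eq_ofList, PySem.Set.ofList_append,
    PySem.Set.update_cons, PySem.Set.update_nil]
  by_cases h : x ∈ v
  · rw [pv_add_mem _ ((PySem.Set.mem_ofList v x).mpr h)]; simp [h]
  · rw [pv_add_not_mem _ (fun hc => h ((PySem.Set.mem_ofList v x).mp hc))]; simp [h]

lemma pv_ofList_single (x : String) : PySem.Set.ofList [x] = [x] := by
  simp [PySem.Set.ofList_eq_foldl, PySem.Set.add, PySem.Set.contains]

lemma pv_keys_gSpec (done : List (String × String)) :
    (gSpec done).map Prod.fst = PySem.List.dedup (done.map Prod.fst) := by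
  simp [gSpec, List.map_map, Function.comp_def]

lemma pv_mem_gSpec {tag : String} (done : List (String × String)) (h : tag ∈ done.map Prod.fst) :
    (tag, PySem.List.dedup ((done.filter (fun p => p.1 == tag)).map Prod.snd)) ∈ gSpec done := by
  exact List.mem_map.mpr ⟨tag, by simpa [PySem.List.mem_dedup] using h, rfl⟩

lemma pv_snoc_mem_mem {tag rid : String} (done : List (String × String))
    (ht : tag ∈ done.map Prod.fst)
    (hr : rid ∈ (done.filter (fun p => p.1 == tag)).map Prod.snd) :
    gSpec (done ++ [(tag, rid)]) = gSpec done := by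
  unfold gSpec
  rw [List.map_append, List.map_cons, List.map_nil, pv_dedup_concat, if_pos ht]
  apply List.map_congr_left
  intro t' _
  by_cases h : t' = tag
  · subst h
    rw [List.filter_append]
    simp only [List.filter_cons, List.filter_nil]
    rw [if_pos (by simp), List.map_append]
    simp only [List.map_cons, List.map_nil]
    rw [pv_dedup_concat, if_pos hr]
  · rw [List.filter_append]
    simp only [List.filter_cons, List.filter_nil]
    rw [if_neg (by simp; exact fun hc => h hc.symm)]
    simp

lemma pv_snoc_mem_not {tag rid : String} (done : List (String × String))
    (ht : tag ∈ done.map Prod.fst)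
    (hr : rid ∉ (done.filter (fun p => p.1 == tag)).map Prod.snd) :
    gSpec (done ++ [(tag, rid)])
      = (gSpec done).map (fun q => if q.1 == tag then (tag,
          PySem.List.dedup ((done.filter (fun p => p.1 == tag)).map Prod.snd) ++ [rid]) else q) := by
  unfold gSpec
  rw [List.map_append, List.map_cons, List.map_nil, pv_dedup_concat, if_pos ht, List.map_map]
  apply List.map_congr_left
  intro t' _
  by_cases h : t' = tag
  · subst h
    simp only [Function.comp_apply, BEq.rfl, if_pos]
    rw [List.filter_append]
    simp only [List.filter_cons, List.filter_nil]
    rw [if_pos (by simp), List.map_append]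
    simp only [List.map_cons, List.map_nil]
    rw [pv_dedup_concat, if_neg hr]
  · have hb : (t' == tag) = false := by simpa using h
    simp only [Function.comp_apply, hb]
    rw [List.filter_append]
    simp only [List.filter_cons, List.filter_nil]
    rw [if_neg (by simp; exact fun hc => h hc.symm)]
    simp

lemma pv_snoc_not {tag rid : String} (done : List (String × String))
    (ht : tag ∉ done.map Prod.fst) :
    gSpec (done ++ [(tag, rid)]) = gSpec done ++ [(tag, [rid])] := by
  unfold gSpec
  rw [List.map_append, List.map_cons, List.map_nil, pv_dedup_concat, if_neg ht, List.map_append]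
  congr 1
  · apply List.map_congr_left
    intro t' ht'
    have hne : tag ≠ t' := by
      have : t' ∈ done.map Prod.fst := by simpa [PySem.List.mem_dedup] using ht'
      intro h; exact ht (h ▸ this)
    rw [List.filter_append]
    simp only [List.filter_cons, List.filter_nil]
    rw [if_neg (by simpa using hne)]
    simp
  · have hnil : done.filter (fun p => p.1 == tag) = [] := by
      apply List.filter_eq_nil_iff.mpr
      intro p hp hc
      exact ht (List.mem_map.mpr ⟨p, hp, by simpa using hc⟩)
    rw [List.map_cons, List.filter_append, hnil]
    simp only [List.filter_cons, List.filter_nil]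
    rw [if_pos (by simp)]
    simp [pv_ofList_single]

lemma pv_inv (l : List (List (String × String))) :
    ∀ (done : List (String × String)) (gA : PySem.Dict String (List String))
      (sA : PySem.Dict String (PySem.Set String)),
      gA.items = gSpec done → sA.items = gSpec done →
      (l.foldl groupStepA (gA, sA)).1.items = gSpec (done ++ pvPairs l) := by
  induction l with
  | nil => intro done gA sA hg _; simpa [pvPairs] using hg
  | cons item t ih =>
    intro done gA sA hg hs
    rw [List.foldl_cons]
    by_cases hv : pvField item "tag" = "" ∨ pvField item "resource_id" = ""
    · rw [show groupStepA (gA, sA) item = (gA, sA) by simp [groupStepA, hv],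
        show pvPairs (item :: t) = pvPairs t by simp [pvPairs, hv]]
      exact ih done gA sA hg hs
    · set tag := pvField item "tag" with htag
      set rid := pvField item "resource_id" with hrid
      have hpairs : pvPairs (item :: t) = (tag, rid) :: pvPairs t := by
        simp [pvPairs, hv, ← htag, ← hrid]
      rw [hpairs, show done ++ ((tag, rid) :: pvPairs t) = (done ++ [(tag, rid)]) ++ pvPairs t by simp]
      have hkg : gA.keys = PySem.List.dedup (done.map Prod.fst) := by
        simp [PySem.Dict.keys, hg, pv_keys_gSpec]
      have hks : sA.keys = PySem.List.dedup (done.map Prod.fst) := by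
        simp [PySem.Dict.keys, hs, pv_keys_gSpec]
      have hndg : gA.keys.Nodup := by rw [hkg]; exact PySem.List.nodup_dedup _
      have hnds : sA.keys.Nodup := by rw [hks]; exact PySem.List.nodup_dedup _
      have hcg : gA.contains tag = decide (tag ∈ done.map Prod.fst) := by
        rw [PySem.Dict.contains_eq_decide_mem_keys, hkg]; simp [PySem.List.mem_dedup]
      have hcs : sA.contains tag = decide (tag ∈ done.map Prod.fst) := by
        rw [PySem.Dict.contains_eq_decide_mem_keys, hks]; simp [PySem.List.mem_dedup]
      by_cases htm : tag ∈ done.map Prod.fst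
      · -- tag already present
        set rids := (done.filter (fun p => p.1 == tag)).map Prod.snd with hrids
        have hmemg : (tag, PySem.List.dedup rids) ∈ gA.items := by rw [hg]; exact pv_mem_gSpec done htm
        have hmems : (tag, PySem.List.dedup rids) ∈ sA.items := by rw [hs]; exact pv_mem_gSpec done htm
        have hgetg : gA.getD tag [] = PySem.List.dedup rids := PySem.Dict.getD_of_mem_items gA hmemg hndg []
        have hgets : sA.getD tag [] = PySem.List.dedup rids := PySem.Dict.getD_of_mem_items sA hmems hnds []
        have hcg' : gA.contains tag = true := by rw [hcg]; simp [htm]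
        have hcs' : sA.contains tag = true := by rw [hcs]; simp [htm]
        by_cases hrm : rid ∈ rids
        · -- duplicate resource_id: A skips, B's filtered dedup is unchanged
          have hA : groupStepA (gA, sA) item = (gA, sA) := by
            simp [groupStepA, hv, ← htag, ← hrid, hcg', hgets, PySem.Set.contains, hrm]
          rw [hA]
          apply ih (done ++ [(tag, rid)])
          · rw [pv_snoc_mem_mem done htm hrm]; exact hg
          · rw [pv_snoc_mem_mem done htm hrm]; exact hs
        · -- new resource_id for an existing tag
          have hnm : rid ∉ PySem.List.dedup rids := by
            rw [PySem.List.mem_dedup]; exact hrm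
          have hA : groupStepA (gA, sA) item
              = (gA.insert tag (PySem.List.dedup rids ++ [rid]),
                 sA.insert tag (PySem.List.dedup rids ++ [rid])) := by
            simp [groupStepA, hv, ← htag, ← hrid, hcg', hgets, hgetg, PySem.Dict.modify,
              PySem.Set.contains, PySem.Set.add, hrm]
          rw [hA]
          apply ih (done ++ [(tag, rid)])
          · rw [PySem.Dict.items_insert_of_contains _ _ hcg', hg, pv_snoc_mem_not done htm hrm]
          · rw [PySem.Dict.items_insert_of_contains _ _ hcs', hs, pv_snoc_mem_not done htm hrm]
      · -- fresh tag
        have hcg' : gA.contains tag = false := by rw [hcg]; simp [htm]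
        have hcs' : sA.contains tag = false := by rw [hcs]; simp [htm]
        have hA : groupStepA (gA, sA) item = (gA.insert tag [rid], sA.insert tag [rid]) := by
          simp [groupStepA, hv, ← htag, ← hrid, hcg', PySem.Dict.modify,
            PySem.Dict.getD_insert_self, PySem.Dict.insert_insert_self, PySem.Set.add,
            PySem.Set.contains]
        rw [hA]
        apply ih (done ++ [(tag, rid)])
        · rw [PySem.Dict.items_insert_of_not_contains _ _ hcg', hg, pv_snoc_not done htm]
        · rw [PySem.Dict.items_insert_of_not_contains _ _ hcs', hs, pv_snoc_not done htm]

-- ===== VERDICT (by name: the statement is the Claim_ definition above) =====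
theorem group_player_tags_py_spec : Claim_equal_group_player_tags_py := by
  intro items _
  unfold Spec_group_player_tags_py group_player_tags_py
  have h := pv_inv items [] PySem.Dict.empty PySem.Dict.empty
    (by simp [PySem.Dict.empty, gSpec]) (by simp [PySem.Dict.empty, gSpec])
  rw [h]
  rfl
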